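-- pv_equiv track=rewrite | github.com/reemdelziz/AlLuRe | app.py | preprocess_lists
-- ===== SOURCE A (Python) =====
-- def preprocess_lists(text):
--     """
--     Process raw text to preserve lists, paragraphs, and headings as separate chunks.
--     """
--     lines = text.split('\n')
--     processed_chunks = []
--     buffer = []
--
--     for line in lines:
--         stripped = line.strip()
--
--         # Detect list items or headings
--         is_list_item = stripped.startswith(("-", "*")) or stripped[:2].isdigit()
--         is_heading = stripped.startswith("==") and stripped.endswith("==")
--
--         if is_list_item or is_heading:
--             if buffer:
--                 processed_chunks.append(" ".join(buffer))
--                 buffer = []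
--             processed_chunks.append(stripped)
--         else:
--             if stripped:  # Skip empty lines
--                 buffer.append(stripped)
--
--     if buffer:
--         processed_chunks.append(" ".join(buffer))
--
--     return processed_chunks
-- ===== SOURCE B (Python) =====
-- def preprocess_lists(text):
--     def special(s):
--         return s.startswith(("-", "*")) or s[:2].isdigit() or (s.startswith("==") and s.endswith("=="))
--
--     lines = [l.strip() for l in text.split('\n')]
--     out = []
--     i, n = 0, len(lines)
--     while i < n:
--         if special(lines[i]):
--             out.append(lines[i])
--             i += 1
--         else:
--             words = []
--             while i < n and not special(lines[i]):
--                 if lines[i]: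
--                     words.append(lines[i])
--                 i += 1
--             if words:
--                 out.append(" ".join(words))
--     return out
-- ===== Notes on version B (the rewrite author's own statement) =====
-- stated objective: alternative
-- what changed: Replaces A's single fold with a mutable buffer flushed at each special line by a strip-all-lines-first pass followed by a run-based walk that emits special lines directly and consumes each maximal non-special run with an inner scan, joining its non-empty lines into one chunk.
import Mathlib
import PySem

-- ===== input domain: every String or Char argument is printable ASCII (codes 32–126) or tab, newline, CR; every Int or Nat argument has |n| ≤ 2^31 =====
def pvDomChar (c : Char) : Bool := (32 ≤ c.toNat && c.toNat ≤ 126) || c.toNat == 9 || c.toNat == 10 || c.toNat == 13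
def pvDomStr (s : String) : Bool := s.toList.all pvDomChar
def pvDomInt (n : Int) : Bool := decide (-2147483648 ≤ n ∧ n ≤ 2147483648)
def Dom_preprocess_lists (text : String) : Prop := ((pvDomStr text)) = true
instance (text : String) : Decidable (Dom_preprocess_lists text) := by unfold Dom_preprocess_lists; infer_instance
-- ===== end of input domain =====

-- B replaces A's buffer-and-flush fold with a strip-first, run-based walk (alternative decomposition, same cost).

-- ===== PORT A =====
-- 'if buffer: chunks.append(" ".join(buffer))' — the flushed piece, shared helper
def pvEmit (buf : List String) : List String :=
  if buf = [] then [] else [PySem.Str.join " " buf]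

def pvStepA (st : List String × List String) (line : String) : List String × List String :=
  let stripped := PySem.Str.strip line
  let is_list_item := PySem.Str.startswith stripped "-" || PySem.Str.startswith stripped "*"
      || PySem.Str.strIsdigit (PySem.Str.slice stripped none (some 2))
  let is_heading := PySem.Str.startswith stripped "==" && PySem.Str.endswith stripped "=="
  if is_list_item || is_heading then
    (st.1 ++ pvEmit st.2 ++ [stripped], [])
  else
    if stripped ≠ "" then (st.1, st.2 ++ [stripped]) else st

def preprocess_lists (text : String) : List String :=
  let lines := ((PySem.Str.split? text "\n").getD [])
  let st := lines.foldl pvStepA ([], [])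
  st.1 ++ pvEmit st.2

-- ===== PORT B =====
def pvSpecial (s : String) : Bool :=
  PySem.Str.startswith s "-" || PySem.Str.startswith s "*"
    || PySem.Str.strIsdigit (PySem.Str.slice s none (some 2))
    || (PySem.Str.startswith s "==" && PySem.Str.endswith s "==")

def pvRunsB : List String → List String
  | [] => []
  | s :: ls =>
    if pvSpecial s then s :: pvRunsB ls
    else
      let run := s :: ls.takeWhile (fun t => !pvSpecial t)
      let words := run.filter (fun t => t ≠ "")
      pvEmit words ++ pvRunsB (ls.dropWhile (fun t => !pvSpecial t))
termination_by l => l.length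
decreasing_by
  · simp
  · have := List.length_dropWhile_le (fun t => !pvSpecial t) ls
    simp; omega

def preprocess_lists_alt (text : String) : List String :=
  pvRunsB ((((PySem.Str.split? text "\n").getD [])).map PySem.Str.strip)

-- ===== PRECONDITION & SPEC =====
def Spec_preprocess_lists (text : String) (out : List String) : Prop := out = preprocess_lists_alt text
instance (text : String) (out : List String) : Decidable (Spec_preprocess_lists text out) := by unfold Spec_preprocess_lists; infer_instance

-- ===== CLAIM (what is proved, stated in full; the proofs are below) =====
def Claim_equal_preprocess_lists : Prop := ∀ (text : String), Dom_preprocess_lists text → Spec_preprocess_lists text (preprocess_lists text)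

-- ===== LEMMAS AND PROOFS =====

-- A's loop, rephrased on already-stripped lines with the buffer as explicit state
def pvG (buf : List String) : List String → List String
  | [] => pvEmit buf
  | s :: ls =>
    if pvSpecial s then pvEmit buf ++ s :: pvG [] ls
    else pvG (buf ++ if s = "" then [] else [s]) ls

-- A's special test equals pvSpecial (associativity of ||)
theorem pvCond_eq (s : String) :
    ((PySem.Str.startswith s "-" || PySem.Str.startswith s "*"
      || PySem.Str.strIsdigit (PySem.Str.slice s none (some 2)))
     || (PySem.Str.startswith s "==" && PySem.Str.endswith s "==")) = pvSpecial s := by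
  simp [pvSpecial, Bool.or_assoc]

theorem pvFoldA (lines : List String) : ∀ (acc buf : List String),
    (let st := lines.foldl pvStepA (acc, buf); st.1 ++ pvEmit st.2)
      = acc ++ pvG buf (lines.map PySem.Str.strip) := by
  induction lines with
  | nil => intro acc buf; simp [pvG]
  | cons l ls ih =>
    intro acc buf
    simp only [List.foldl_cons, List.map_cons]
    rw [show pvStepA (acc, buf) l =
        (if pvSpecial (PySem.Str.strip l) then (acc ++ pvEmit buf ++ [PySem.Str.strip l], ([] : List String))
         else if PySem.Str.strip l ≠ "" then (acc, buf ++ [PySem.Str.strip l]) else (acc, buf)) from by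
      simp only [pvStepA, pvCond_eq]]
    have hse : pvSpecial "" = false := by decide
    by_cases h : pvSpecial (PySem.Str.strip l)
    · simp [h, ih, pvG]
    · by_cases h2 : PySem.Str.strip l = ""
      · simp [h2, ih, pvG, hse]
      · simp [h, h2, ih, pvG]

theorem pvRunsB_unfold (ls : List String) :
    pvRunsB ls = pvEmit ((ls.takeWhile (fun t => !pvSpecial t)).filter (fun t => t ≠ ""))
      ++ pvRunsB (ls.dropWhile (fun t => !pvSpecial t)) := by
  match ls with
  | [] => simp [pvRunsB, pvEmit]
  | s :: ls =>
    by_cases h : pvSpecial s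
    · simp [pvRunsB, h, pvEmit]
    · simp [pvRunsB, h]

theorem pvG_eq (ls : List String) : ∀ (buf : List String),
    pvG buf ls = pvEmit (buf ++ (ls.takeWhile (fun t => !pvSpecial t)).filter (fun t => t ≠ ""))
      ++ pvRunsB (ls.dropWhile (fun t => !pvSpecial t)) := by
  induction ls with
  | nil => intro buf; simp [pvG, pvRunsB]
  | cons s ls ih =>
    intro buf
    have hse : pvSpecial "" = false := by decide
    by_cases h : pvSpecial s
    · have hB : pvG [] ls = pvRunsB ls := by
        rw [ih [], pvRunsB_unfold ls]; simp
      simp [pvG, h, pvRunsB, hB]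
    · by_cases h2 : s = ""
      · simp [pvG, h2, ih, hse]
      · simp [pvG, h, h2, ih]

-- ===== VERDICT (by name: the statement is the Claim_ definition above) =====
theorem preprocess_lists_spec : Claim_equal_preprocess_lists := by
  intro text _
  unfold Spec_preprocess_lists preprocess_lists preprocess_lists_alt
  rw [pvFoldA, pvG_eq]
  simp only [List.nil_append]
  exact (pvRunsB_unfold _).symm
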